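-- pv_equiv track=rewrite | github.com/KobraKob/Knowledge-Orchestrated-Brain-for-Real-time-Action-KOBRA- | agents/integration_agent.py | _select_tools_for
-- ===== SOURCE A (Python) =====
-- def _select_tools_for(instruction: str) -> list[str]:
--     """
--     Return the minimal set of tools needed for this instruction (≤4 tools).
--     Showing all 10 integration tools to the 70b model is fine, but keeping
--     the list tight makes tool selection faster and eliminates wrong-tool picks.
--     """
--     t = instruction.lower()
--     base = ["speak_only"]
--
--     if any(w in t for w in ("email", "gmail", "send mail", "inbox", "unread")):
--         return base + ["send_email", "read_emails", "save_contact"]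
--
--     if any(w in t for w in ("calendar", "meeting", "event", "schedule",
--                              "appointment", "today", "tomorrow", "this week")):
--         return base + ["get_calendar_events", "create_calendar_event", "delete_calendar_event"]
--
--     if any(w in t for w in ("spotify", "play", "pause", "skip", "volume",
--                              "resume", "music", "song", "track")):
--         return base + ["play_spotify", "control_spotify"]
--
--     if any(w in t for w in ("contact", "save", "who is", "number", "phone")):
--         return base + ["save_contact", "resolve_contact"]
--
--     # Fallback — most common pair
--     return base + ["get_calendar_events", "send_email", "play_spotify"]
-- ===== SOURCE B (Python) =====
-- GROUPS = [
--     ("email", "gmail", "send mail", "inbox", "unread"),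
--     ("calendar", "meeting", "event", "schedule",
--      "appointment", "today", "tomorrow", "this week"),
--     ("spotify", "play", "pause", "skip", "volume",
--      "resume", "music", "song", "track"),
--     ("contact", "save", "who is", "number", "phone"),
-- ]
--
-- TOOLS = [
--     ["send_email", "read_emails", "save_contact"],
--     ["get_calendar_events", "create_calendar_event", "delete_calendar_event"],
--     ["play_spotify", "control_spotify"],
--     ["save_contact", "resolve_contact"],
--     ["get_calendar_events", "send_email", "play_spotify"],  # fallback
-- ]
--
--
-- def _select_tools_for(instruction: str) -> list[str]:
--     t = instruction.lower()
--     # collect the priority of every matching keyword, then take the best (min);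
--     # no match at all selects the fallback slot 4
--     hits = [p for p, group in enumerate(GROUPS) for w in group if w in t]
--     cat = min(hits) if hits else 4
--     return ["speak_only"] + TOOLS[cat]
-- ===== Notes on version B (the rewrite author's own statement) =====
-- stated objective: alternative
-- what changed: Instead of A's short-circuiting if/any chain that stops at the first matching branch, B scans every keyword exactly once, collecting the priority index of each matching keyword, and aggregates with min (default 4 = fallback) to index a tools table; this is equivalent because branch priority equals the group's index.
import Mathlib
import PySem

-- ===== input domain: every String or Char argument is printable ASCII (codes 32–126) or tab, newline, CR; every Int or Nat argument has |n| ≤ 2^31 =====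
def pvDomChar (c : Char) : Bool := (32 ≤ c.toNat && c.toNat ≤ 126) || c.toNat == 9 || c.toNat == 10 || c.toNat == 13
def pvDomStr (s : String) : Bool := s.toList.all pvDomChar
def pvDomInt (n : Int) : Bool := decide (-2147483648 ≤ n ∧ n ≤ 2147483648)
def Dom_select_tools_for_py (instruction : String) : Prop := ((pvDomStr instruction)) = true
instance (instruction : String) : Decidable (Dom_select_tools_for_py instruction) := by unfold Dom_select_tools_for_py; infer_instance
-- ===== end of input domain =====

-- B rewrites the short-circuiting if/any chain as one scan over all (keyword, priority) pairs
-- aggregated with min (alternative decomposition; same asymptotic cost).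


-- ===== PORT A =====
def select_tools_for_py (instruction : String) : List String :=
  let t := PySem.Str.lower instruction
  let base := ["speak_only"]
  if ["email", "gmail", "send mail", "inbox", "unread"].any
      (fun w => PySem.Str.isIn w t) then
    base ++ ["send_email", "read_emails", "save_contact"]
  else if ["calendar", "meeting", "event", "schedule",
           "appointment", "today", "tomorrow", "this week"].any
      (fun w => PySem.Str.isIn w t) then
    base ++ ["get_calendar_events", "create_calendar_event", "delete_calendar_event"]
  else if ["spotify", "play", "pause", "skip", "volume",
           "resume", "music", "song", "track"].any
      (fun w => PySem.Str.isIn w t) then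
    base ++ ["play_spotify", "control_spotify"]
  else if ["contact", "save", "who is", "number", "phone"].any
      (fun w => PySem.Str.isIn w t) then
    base ++ ["save_contact", "resolve_contact"]
  else
    base ++ ["get_calendar_events", "send_email", "play_spotify"]

-- ===== PORT B =====
-- B: keyword groups with priorities; B scans ALL keywords, collects the priority of
-- each match, and takes the minimum (4 = fallback slot when nothing matches).
def pvGroups : List (List String) :=
  [["email", "gmail", "send mail", "inbox", "unread"],
   ["calendar", "meeting", "event", "schedule",
    "appointment", "today", "tomorrow", "this week"],
   ["spotify", "play", "pause", "skip", "volume",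
    "resume", "music", "song", "track"],
   ["contact", "save", "who is", "number", "phone"]]

def pvTools : List (List String) :=
  [["send_email", "read_emails", "save_contact"],
   ["get_calendar_events", "create_calendar_event", "delete_calendar_event"],
   ["play_spotify", "control_spotify"],
   ["save_contact", "resolve_contact"],
   ["get_calendar_events", "send_email", "play_spotify"]]

def select_tools_for_py_alt (instruction : String) : List String :=
  let t := PySem.Str.lower instruction
  -- List.zipIdx pairs each group with its index ((group, p)) = enumerate with components swapped
  let hits := (pvGroups.zipIdx).flatMap
    (fun gp => gp.1.filterMap (fun w => if PySem.Str.isIn w t then some gp.2 else none))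
  let cat := (hits.min?).getD 4
  ["speak_only"] ++ pvTools.getD cat []

-- ===== PRECONDITION & SPEC =====
def Spec_select_tools_for_py (instruction : String) (out : List String) : Prop := out = select_tools_for_py_alt instruction
instance (instruction : String) (out : List String) : Decidable (Spec_select_tools_for_py instruction out) := by unfold Spec_select_tools_for_py; infer_instance

-- ===== CLAIM (what is proved, stated in full; the proofs are below) =====
def Claim_equal_select_tools_for_py : Prop := ∀ (instruction : String), Dom_select_tools_for_py instruction → Spec_select_tools_for_py instruction (select_tools_for_py instruction)

-- ===== LEMMAS AND PROOFS =====

-- each hit contributed by group p is the value p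
theorem pv_mem_hits {g : List String} {t : String} {p x : Nat}
    (hx : x ∈ g.filterMap (fun w => if PySem.Str.isIn w t then some p else none)) : x = p := by
  simp only [List.mem_filterMap] at hx
  obtain ⟨w, _, hw⟩ := hx
  split at hw <;> simp_all

-- a group's hit list is nonempty exactly when some of its keywords occurs in t
theorem pv_hits_ne_nil {g : List String} {t : String} {p : Nat} :
    g.filterMap (fun w => if PySem.Str.isIn w t then some p else none) ≠ [] ↔
      g.any (fun w => PySem.Str.isIn w t) = true := by
  simp only [ne_eq, List.filterMap_eq_nil_iff, List.any_eq_true]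
  constructor
  · intro h
    by_contra hc
    push Not at hc
    exact h fun w hw => if_neg (by simpa using hc w hw)
  · rintro ⟨w, hw, hm⟩ h
    have := h w hw
    rw [if_pos hm] at this
    simp at this

-- min over the concatenation of per-priority hit lists = index of the first nonempty one
theorem pv_min_chain (l0 l1 l2 l3 : List Nat)
    (h0 : ∀ x ∈ l0, x = 0) (h1 : ∀ x ∈ l1, x = 1)
    (h2 : ∀ x ∈ l2, x = 2) (h3 : ∀ x ∈ l3, x = 3) :
    ((l0 ++ (l1 ++ (l2 ++ l3))).min?).getD 4 =
      if l0 ≠ [] then 0 else if l1 ≠ [] then 1 else if l2 ≠ [] then 2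
      else if l3 ≠ [] then 3 else 4 := by
  split_ifs with e0 e1 e2 e3
  · obtain ⟨x, hx⟩ := List.exists_mem_of_ne_nil _ e0
    have hmin : (l0 ++ (l1 ++ (l2 ++ l3))).min? = some 0 := by
      rw [List.min?_eq_some_iff]
      refine ⟨List.mem_append_left _ (h0 x hx ▸ hx), fun b _ => Nat.zero_le b⟩
    rw [hmin]; rfl
  · rw [not_not] at e0; subst e0
    obtain ⟨x, hx⟩ := List.exists_mem_of_ne_nil _ e1
    have hmin : (([] : List Nat) ++ (l1 ++ (l2 ++ l3))).min? = some 1 := by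
      rw [List.min?_eq_some_iff]
      refine ⟨by simp [List.mem_append]; exact Or.inl (h1 x hx ▸ hx), ?_⟩
      intro b hb
      simp only [List.nil_append, List.mem_append] at hb
      rcases hb with h | h | h
      · have := h1 b h; omega
      · have := h2 b h; omega
      · have := h3 b h; omega
    rw [hmin]; rfl
  · rw [not_not] at e0 e1; subst e0; subst e1
    obtain ⟨x, hx⟩ := List.exists_mem_of_ne_nil _ e2
    have hmin : (([] : List Nat) ++ (([] : List Nat) ++ (l2 ++ l3))).min? = some 2 := by
      rw [List.min?_eq_some_iff]
      refine ⟨by simp [List.mem_append]; exact Or.inl (h2 x hx ▸ hx), ?_⟩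
      intro b hb
      simp only [List.nil_append, List.mem_append] at hb
      rcases hb with h | h
      · have := h2 b h; omega
      · have := h3 b h; omega
    rw [hmin]; rfl
  · rw [not_not] at e0 e1 e2; subst e0; subst e1; subst e2
    obtain ⟨x, hx⟩ := List.exists_mem_of_ne_nil _ e3
    have hmin : (([] : List Nat) ++ (([] : List Nat) ++ (([] : List Nat) ++ l3))).min? = some 3 := by
      rw [List.min?_eq_some_iff]
      refine ⟨by simpa using (h3 x hx ▸ hx), ?_⟩
      intro b hb
      simp only [List.nil_append] at hb
      have := h3 b hb; omega
    rw [hmin]; rfl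
  · rw [not_not] at e0 e1 e2 e3; subst e0; subst e1; subst e2; subst e3
    rfl

-- ===== VERDICT (by name: the statement is the Claim_ definition above) =====
theorem select_tools_for_py_spec : Claim_equal_select_tools_for_py := by
  intro instruction _
  unfold Spec_select_tools_for_py select_tools_for_py select_tools_for_py_alt pvGroups pvTools
  simp only [List.zipIdx, List.flatMap_cons, List.flatMap_nil, List.append_nil]
  rw [pv_min_chain _ _ _ _
      (fun x hx => pv_mem_hits hx) (fun x hx => pv_mem_hits hx)
      (fun x hx => pv_mem_hits hx) (fun x hx => pv_mem_hits hx)]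
  simp only [pv_hits_ne_nil]
  split_ifs <;> rfl
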